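-- pv_equiv track=rewrite | github.com/joaovictorvolpato/challenge-sbpo-2025 | explorer.py | find_aisles_and_items
-- ===== SOURCE A (Python) =====
-- from collections import defaultdict
--
-- def find_aisles_and_items(order,aisle_book):
--     corridors_visited = set()
--     items_to_pick = order.copy()
--     retrieval_plan = defaultdict(int)
--
--     corridor_scores = defaultdict(int)
--     for item, corridors in aisle_book.items():
--         if item in items_to_pick:
--             for corridor, available in corridors.items():
--                 corridor_scores[corridor] += min(items_to_pick[item], available)
--
--     sorted_corridors = sorted(corridor_scores.items(), key=lambda x: x[1], reverse=True)
--
--     for corridor, _ in sorted_corridors: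
--         for item in aisle_book:
--             if item in items_to_pick and items_to_pick[item] > 0 and corridor in aisle_book[item]:
--                 take = min(items_to_pick[item], aisle_book[item][corridor])
--                 retrieval_plan[(item, corridor)] += take
--                 corridors_visited.add(corridor)
--                 items_to_pick[item] -= take
--
--     if any(amount > 0 for amount in items_to_pick.values()):
--         return 1000
--
--     return len(corridors_visited)
-- ===== SOURCE B (Python) =====
-- from collections import defaultdict
--
-- def find_aisles_and_items(order, aisle_book):
--     remaining = order.copy()
--     corridor_scores = defaultdict(int)
--     corridor_items = defaultdict(list)
--     for item, corridors in aisle_book.items():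
--         if item in remaining:
--             for corridor, available in corridors.items():
--                 corridor_scores[corridor] += min(remaining[item], available)
--                 corridor_items[corridor].append((item, available))
--     visited = set()
--     for corridor, _ in sorted(corridor_scores.items(), key=lambda x: x[1], reverse=True):
--         for item, available in corridor_items[corridor]:
--             if remaining[item] > 0:
--                 visited.add(corridor)
--                 remaining[item] -= min(remaining[item], available)
--     if any(v > 0 for v in remaining.values()):
--         return 1000
--     return len(visited)
-- ===== Notes on version B (the rewrite author's own statement) =====
-- stated objective: faster
-- what changed: A's second phase re-scans every aisle-book item (with dict membership tests and lookups) for every sorted corridor; B builds an inverse index corridor -> [(item, available)] during the single scoring pass and each corridor then visits only its own entries.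
import Mathlib
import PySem

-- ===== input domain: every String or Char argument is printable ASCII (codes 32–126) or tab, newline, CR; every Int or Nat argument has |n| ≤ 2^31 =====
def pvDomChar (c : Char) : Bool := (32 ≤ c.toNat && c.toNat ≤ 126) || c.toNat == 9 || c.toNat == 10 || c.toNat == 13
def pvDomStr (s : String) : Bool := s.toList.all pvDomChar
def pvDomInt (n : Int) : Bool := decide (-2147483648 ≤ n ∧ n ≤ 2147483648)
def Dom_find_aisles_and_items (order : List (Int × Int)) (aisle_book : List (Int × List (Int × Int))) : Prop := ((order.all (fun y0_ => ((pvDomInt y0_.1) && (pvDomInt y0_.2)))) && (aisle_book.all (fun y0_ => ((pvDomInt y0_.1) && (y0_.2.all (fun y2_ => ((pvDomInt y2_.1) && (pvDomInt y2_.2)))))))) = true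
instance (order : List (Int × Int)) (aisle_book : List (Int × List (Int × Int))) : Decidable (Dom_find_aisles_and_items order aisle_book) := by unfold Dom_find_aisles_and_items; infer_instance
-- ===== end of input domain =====

-- B replaces A's quadratic second phase (every corridor re-scans every item of the
-- aisle book) by an inverse index corridor -> [(item, available)] built during the
-- first pass, so each corridor only visits its own entries. Objective: faster.

-- ===== PORT A =====
-- one score-accumulation step of A's first loop (loop body named as a helper)
def pvA_scoreStep (itp0 : PySem.Dict Int Int) (cs : PySem.Dict Int Int)
    (p : Int × PySem.Dict Int Int) : PySem.Dict Int Int :=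
  if itp0.contains p.1 then
    p.2.items.foldl (fun cs q => cs.modify q.1 0 (· + min (itp0.getD p.1 0) q.2)) cs
  else cs

-- one step of A's second loop: state (corridors_visited, retrieval_plan, items_to_pick)
def pvA_pickStep (ab : PySem.Dict Int (PySem.Dict Int Int)) (c : Int)
    (st : PySem.Set Int × PySem.Dict (Int × Int) Int × PySem.Dict Int Int) (item : Int) :
    PySem.Set Int × PySem.Dict (Int × Int) Int × PySem.Dict Int Int :=
  if st.2.2.contains item && decide (0 < st.2.2.getD item 0) && (ab.getD item PySem.Dict.empty).contains c then
    let take := min (st.2.2.getD item 0) ((ab.getD item PySem.Dict.empty).getD c 0)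
    (PySem.Set.add st.1 c, st.2.1.modify (item, c) 0 (· + take),
     st.2.2.insert item (st.2.2.getD item 0 - take))
  else st

def find_aisles_and_items (order : List (Int × Int)) (aisle_book : List (Int × List (Int × Int))) : Int :=
  let items_to_pick : PySem.Dict Int Int := PySem.Dict.ofList order
  let ab : PySem.Dict Int (PySem.Dict Int Int) :=
    PySem.Dict.ofList (aisle_book.map (fun p => (p.1, PySem.Dict.ofList p.2)))
  let corridor_scores := ab.items.foldl (pvA_scoreStep items_to_pick) PySem.Dict.empty
  let sorted_corridors := PySem.List.sorted corridor_scores.items (fun x => x.2) true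
  let st := sorted_corridors.foldl (fun st cp => ab.keys.foldl (pvA_pickStep ab cp.1) st)
      (PySem.Set.empty, PySem.Dict.empty, items_to_pick)
  if st.2.2.values.any (fun a => decide (0 < a)) then 1000 else ((st.1.length : Nat) : Int)

-- ===== PORT B =====
-- one step of B's single build pass: state (corridor_scores, corridor_items)
def pvB_buildStep (rem : PySem.Dict Int Int)
    (sc : PySem.Dict Int Int × PySem.Dict Int (List (Int × Int)))
    (p : Int × PySem.Dict Int Int) :
    PySem.Dict Int Int × PySem.Dict Int (List (Int × Int)) :=
  if rem.contains p.1 then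
    p.2.items.foldl (fun sc q =>
      (sc.1.modify q.1 0 (· + min (rem.getD p.1 0) q.2),
       sc.2.modify q.1 [] (· ++ [(p.1, q.2)]))) sc
  else sc

-- one step of B's picking loop over a corridor's own entry list: state (visited, remaining)
def pvB_pickStep (c : Int) (st : PySem.Set Int × PySem.Dict Int Int) (ia : Int × Int) :
    PySem.Set Int × PySem.Dict Int Int :=
  if decide (0 < st.2.getD ia.1 0) then
    (PySem.Set.add st.1 c,
     st.2.insert ia.1 (st.2.getD ia.1 0 - min (st.2.getD ia.1 0) ia.2))
  else st

def find_aisles_and_items_alt (order : List (Int × Int)) (aisle_book : List (Int × List (Int × Int))) : Int :=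
  let remaining : PySem.Dict Int Int := PySem.Dict.ofList order
  let ab : PySem.Dict Int (PySem.Dict Int Int) :=
    PySem.Dict.ofList (aisle_book.map (fun p => (p.1, PySem.Dict.ofList p.2)))
  let built := ab.items.foldl (pvB_buildStep remaining) (PySem.Dict.empty, PySem.Dict.empty)
  let st := (PySem.List.sorted built.1.items (fun x => x.2) true).foldl
      (fun st cp => (built.2.getD cp.1 []).foldl (pvB_pickStep cp.1) st)
      (PySem.Set.empty, remaining)
  if st.2.values.any (fun v => decide (0 < v)) then 1000 else ((st.1.length : Nat) : Int)

-- ===== PRECONDITION & SPEC =====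
def Spec_find_aisles_and_items (order : List (Int × Int)) (aisle_book : List (Int × List (Int × Int))) (out : Int) : Prop := out = find_aisles_and_items_alt order aisle_book
instance (order : List (Int × Int)) (aisle_book : List (Int × List (Int × Int))) (out : Int) : Decidable (Spec_find_aisles_and_items order aisle_book out) := by unfold Spec_find_aisles_and_items; infer_instance

-- ===== CLAIM (what is proved, stated in full; the proofs are below) =====
def Claim_equal_find_aisles_and_items : Prop := ∀ (order : List (Int × Int)) (aisle_book : List (Int × List (Int × Int))), Dom_find_aisles_and_items order aisle_book → Spec_find_aisles_and_items order aisle_book (find_aisles_and_items order aisle_book)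

-- ===== LEMMAS AND PROOFS =====

-- proof-side: the corridor_items component of B's build pass, in isolation
def pvCitStep (itp0 : PySem.Dict Int Int) (t : PySem.Dict Int (List (Int × Int)))
    (p : Int × PySem.Dict Int Int) : PySem.Dict Int (List (Int × Int)) :=
  if itp0.contains p.1 then
    p.2.items.foldl (fun t q => t.modify q.1 [] (· ++ [(p.1, q.2)])) t
  else t

-- proof-side: the entries relevant to corridor c, in aisle-book order
def pvRel (itp0 : PySem.Dict Int Int) (L : List (Int × PySem.Dict Int Int)) (c : Int) :
    List (Int × Int) :=
  L.filterMap (fun p =>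
    if itp0.contains p.1 && p.2.contains c then some (p.1, p.2.getD c 0) else none)

-- proof-side: A's second-loop body re-expressed on (key, value) pairs of the aisle dict
def pvA_pickStepP (c : Int)
    (st : PySem.Set Int × PySem.Dict (Int × Int) Int × PySem.Dict Int Int)
    (p : Int × PySem.Dict Int Int) :
    PySem.Set Int × PySem.Dict (Int × Int) Int × PySem.Dict Int Int :=
  if st.2.2.contains p.1 && decide (0 < st.2.2.getD p.1 0) && p.2.contains c then
    let take := min (st.2.2.getD p.1 0) (p.2.getD c 0)
    (PySem.Set.add st.1 c, st.2.1.modify (p.1, c) 0 (· + take),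
     st.2.2.insert p.1 (st.2.2.getD p.1 0 - take))
  else st

def pvInv (itp0 itp : PySem.Dict Int Int) : Prop := ∀ k, itp.contains k = itp0.contains k

theorem pv_split (itp0 : PySem.Dict Int Int) :
    ∀ (L : List (Int × PySem.Dict Int Int)) (s : PySem.Dict Int Int)
      (t : PySem.Dict Int (List (Int × Int))),
    L.foldl (pvB_buildStep itp0) (s, t) =
      (L.foldl (pvA_scoreStep itp0) s, L.foldl (pvCitStep itp0) t) := by
  intro L
  induction L with
  | nil => intro s t; rfl
  | cons p L ih =>
    intro s t
    simp only [List.foldl_cons, pvB_buildStep, pvA_scoreStep, pvCitStep]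
    split_ifs with h
    · rw [PySem.List.foldl_prod_mk
        (fun cs q => cs.modify q.1 0 (· + min (itp0.getD p.1 0) q.2))
        (fun t q => t.modify q.1 [] (· ++ [(p.1, q.2)])) p.2.items s t, ih]
    · exact ih s t

theorem pv_filter_key : ∀ (l : List (Int × Int)) (c : Int), (l.map Prod.fst).Nodup →
    l.filter (fun q => q.1 == c) =
      if (PySem.Dict.mk l).contains c then [(c, (PySem.Dict.mk l).getD c 0)] else [] := by
  intro l
  induction l with
  | nil => intro c _; simp [PySem.Dict.contains]
  | cons p l ih =>
    intro c hnd
    simp only [List.map_cons, List.nodup_cons] at hnd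
    by_cases h : p.1 = c
    · subst h
      have hfil : l.filter (fun q => q.1 == p.1) = [] := by
        rw [List.filter_eq_nil_iff]
        intro q hq
        simp only [beq_iff_eq]
        intro hqc
        exact hnd.1 (hqc ▸ List.mem_map_of_mem hq)
      simp [hfil, PySem.Dict.contains, PySem.Dict.getD, PySem.Dict.get?]
    · have hb : (p.1 == c) = false := by simp [h]
      simp only [List.filter_cons, hb, Bool.false_eq_true, if_false]
      rw [ih c hnd.2]
      simp only [PySem.Dict.contains, PySem.Dict.getD, PySem.Dict.get?, List.any_cons,
        List.find?_cons, hb, Bool.false_or]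

theorem pv_dict_filter (d : PySem.Dict Int Int) (c : Int) (h : d.keys.Nodup) :
    d.items.filter (fun q => q.1 == c) = if d.contains c then [(c, d.getD c 0)] else [] := by
  cases d with
  | mk l =>
    rw [PySem.Dict.keys_mk] at h
    exact pv_filter_key l c h

theorem pvRel_cons (itp0 : PySem.Dict Int Int) (p : Int × PySem.Dict Int Int)
    (L : List (Int × PySem.Dict Int Int)) (c : Int) :
    pvRel itp0 (p :: L) c =
      (if itp0.contains p.1 && p.2.contains c then [(p.1, p.2.getD c 0)] else []) ++
        pvRel itp0 L c := by
  cases hA : itp0.contains p.1 <;> cases hB : p.2.contains c <;> simp [pvRel, hA, hB]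

theorem pv_cit_getD (itp0 : PySem.Dict Int Int) :
    ∀ (L : List (Int × PySem.Dict Int Int)) (t : PySem.Dict Int (List (Int × Int))) (c : Int),
    (∀ p ∈ L, p.2.keys.Nodup) →
    (L.foldl (pvCitStep itp0) t).getD c [] = t.getD c [] ++ pvRel itp0 L c := by
  intro L
  induction L with
  | nil => intro t c _; simp [pvRel]
  | cons p L ih =>
    intro t c h
    have hnd : p.2.keys.Nodup := h p (List.mem_cons_self)
    have htl : ∀ q ∈ L, q.2.keys.Nodup := fun q hq => h q (List.mem_cons_of_mem _ hq)
    rw [List.foldl_cons, pvRel_cons]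
    by_cases h1 : itp0.contains p.1 = true
    · rw [show pvCitStep itp0 t p
          = p.2.items.foldl (fun t q => t.modify q.1 [] (· ++ [(p.1, q.2)])) t by
          simp [pvCitStep, h1]]
      rw [ih _ c htl]
      have hfm : p.2.items.foldl (fun t q => t.modify q.1 [] (· ++ [(p.1, q.2)])) t
          = (p.2.items.map (fun q => (q.1, (p.1, q.2)))).foldl
              (fun d r => d.modify r.1 [] (· ++ [r.2])) t := by
        rw [List.foldl_map]
      rw [hfm, PySem.Dict.getD_foldl_modify_append, List.filter_map]
      have hcomp : ((fun r : Int × (Int × Int) => r.1 == c) ∘ (fun q : Int × Int => (q.1, (p.1, q.2))))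
          = (fun q : Int × Int => q.1 == c) := rfl
      rw [hcomp, pv_dict_filter p.2 c hnd]
      simp only [h1, Bool.true_and]
      by_cases h2 : p.2.contains c = true
      · simp [h2, List.append_assoc]
      · simp [h2]
    · rw [show pvCitStep itp0 t p = t by simp [pvCitStep, h1]]
      rw [ih t c htl]
      simp [h1]

theorem pv_update_pres {κ ν : Type} [BEq κ] (P : κ × ν → Prop) :
    ∀ (l : List (κ × ν)) (d : PySem.Dict κ ν),
    (∀ p ∈ d.items, P p) → (∀ p ∈ l, P p) → ∀ p ∈ (d.update l).items, P p := by
  intro l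
  induction l with
  | nil => intro d hd _ p hp; exact hd p hp
  | cons x l ih =>
    intro d hd hl
    have hins : ∀ p ∈ (d.insert x.1 x.2).items, P p := by
      intro p hp
      by_cases hc : d.contains x.1 = true
      · rw [PySem.Dict.items_insert_of_contains d x.2 hc] at hp
        obtain ⟨q, hq, hqe⟩ := List.mem_map.mp hp
        by_cases hqk : (q.1 == x.1) = true
        · rw [if_pos hqk] at hqe
          subst hqe; exact hl x List.mem_cons_self
        · rw [if_neg hqk] at hqe; subst hqe; exact hd q hq
      · rw [PySem.Dict.items_insert_of_not_contains d x.2 (by simpa using hc)] at hp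
        rcases List.mem_append.mp hp with h | h
        · exact hd p h
        · rcases List.mem_singleton.mp h with rfl
          exact hl x List.mem_cons_self
    have hstep : d.update (x :: l) = (d.insert x.1 x.2).update l := by
      simp [PySem.Dict.update]
    rw [hstep]
    exact ih _ hins (fun p hp => hl p (List.mem_cons_of_mem _ hp))

theorem pv_vals_nodup (aisle_book : List (Int × List (Int × Int))) :
    ∀ p ∈ (PySem.Dict.ofList (aisle_book.map (fun p => (p.1, PySem.Dict.ofList p.2)))).items,
      p.2.keys.Nodup := by
  simp only [PySem.Dict.ofList]
  refine pv_update_pres (fun (p : Int × PySem.Dict Int Int) => p.2.keys.Nodup) _ _ ?_ ?_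
  · intro p hp; simp [PySem.Dict.empty] at hp
  · intro p hp
    obtain ⟨q, _, rfl⟩ := List.mem_map.mp hp
    exact PySem.Dict.nodup_keys_ofList q.2

theorem pv_keysfold_eq (ab : PySem.Dict Int (PySem.Dict Int Int)) (c : Int)
    (st : PySem.Set Int × PySem.Dict (Int × Int) Int × PySem.Dict Int Int)
    (h : ab.keys.Nodup) :
    ab.keys.foldl (pvA_pickStep ab c) st = ab.items.foldl (pvA_pickStepP c) st := by
  rw [PySem.Dict.items_eq_map_keys ab h PySem.Dict.empty, List.foldl_map]
  rfl

theorem pv_inner (itp0 : PySem.Dict Int Int) (c : Int) :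
    ∀ (L : List (Int × PySem.Dict Int Int)) (v : PySem.Set Int)
      (pl : PySem.Dict (Int × Int) Int) (itp : PySem.Dict Int Int),
    pvInv itp0 itp →
    (L.foldl (pvA_pickStepP c) (v, pl, itp)).1 =
        ((pvRel itp0 L c).foldl (pvB_pickStep c) (v, itp)).1 ∧
    (L.foldl (pvA_pickStepP c) (v, pl, itp)).2.2 =
        ((pvRel itp0 L c).foldl (pvB_pickStep c) (v, itp)).2 ∧
    pvInv itp0 (L.foldl (pvA_pickStepP c) (v, pl, itp)).2.2 := by
  intro L
  induction L with
  | nil => intro v pl itp hinv; exact ⟨rfl, rfl, hinv⟩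
  | cons p L ih =>
    intro v pl itp hinv
    rw [List.foldl_cons, pvRel_cons]
    by_cases hb : (itp0.contains p.1 && p.2.contains c) = true
    · have h1 : itp0.contains p.1 = true := (Bool.and_eq_true _ _ |>.mp hb).1
      have h2 : p.2.contains c = true := (Bool.and_eq_true _ _ |>.mp hb).2
      rw [if_pos hb, List.singleton_append, List.foldl_cons]
      by_cases h3 : (0 : Int) < itp.getD p.1 0
      · rw [show pvA_pickStepP c (v, pl, itp) p
            = (PySem.Set.add v c, pl.modify (p.1, c) 0 (· + min (itp.getD p.1 0) (p.2.getD c 0)),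
               itp.insert p.1 (itp.getD p.1 0 - min (itp.getD p.1 0) (p.2.getD c 0))) by
          simp [pvA_pickStepP, hinv p.1, h1, h2, h3]]
        rw [show pvB_pickStep c (v, itp) (p.1, p.2.getD c 0)
            = (PySem.Set.add v c,
               itp.insert p.1 (itp.getD p.1 0 - min (itp.getD p.1 0) (p.2.getD c 0))) by
          simp [pvB_pickStep, h3]]
        apply ih
        intro k
        rw [PySem.Dict.contains_insert]
        by_cases hk : (k == p.1) = true
        · simp [hk, (beq_iff_eq.mp hk ▸ h1 : itp0.contains k = true)]
        · simp [hk, hinv k]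
      · rw [show pvA_pickStepP c (v, pl, itp) p = (v, pl, itp) by
          simp [pvA_pickStepP, h3]]
        rw [show pvB_pickStep c (v, itp) (p.1, p.2.getD c 0) = (v, itp) by
          simp [pvB_pickStep, h3]]
        exact ih v pl itp hinv
    · rw [if_neg hb, List.nil_append]
      rw [show pvA_pickStepP c (v, pl, itp) p = (v, pl, itp) by
        cases ha : itp0.contains p.1 <;> cases hc : p.2.contains c <;>
          simp_all [pvA_pickStepP, hinv p.1]]
      exact ih v pl itp hinv

theorem pv_outer (itp0 : PySem.Dict Int Int) (L0 : List (Int × PySem.Dict Int Int))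
    (cit : PySem.Dict Int (List (Int × Int)))
    (hcit : ∀ c, cit.getD c [] = pvRel itp0 L0 c) :
    ∀ (cs : List (Int × Int)) (v : PySem.Set Int)
      (pl : PySem.Dict (Int × Int) Int) (itp : PySem.Dict Int Int),
    pvInv itp0 itp →
    (cs.foldl (fun st cp => L0.foldl (pvA_pickStepP cp.1) st) (v, pl, itp)).1 =
        (cs.foldl (fun st cp => (cit.getD cp.1 []).foldl (pvB_pickStep cp.1) st) (v, itp)).1 ∧
    (cs.foldl (fun st cp => L0.foldl (pvA_pickStepP cp.1) st) (v, pl, itp)).2.2 =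
        (cs.foldl (fun st cp => (cit.getD cp.1 []).foldl (pvB_pickStep cp.1) st) (v, itp)).2 := by
  intro cs
  induction cs with
  | nil => intro v pl itp hinv; exact ⟨rfl, rfl⟩
  | cons cp cs ih =>
    intro v pl itp hinv
    rw [List.foldl_cons, List.foldl_cons, hcit cp.1]
    obtain ⟨h1, h2, h3⟩ := pv_inner itp0 cp.1 L0 v pl itp hinv
    have hB : (pvRel itp0 L0 cp.1).foldl (pvB_pickStep cp.1) (v, itp)
        = ((L0.foldl (pvA_pickStepP cp.1) (v, pl, itp)).1,
           (L0.foldl (pvA_pickStepP cp.1) (v, pl, itp)).2.2) :=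
      Prod.ext_iff.mpr ⟨h1.symm, h2.symm⟩
    rw [hB]
    exact ih (L0.foldl (pvA_pickStepP cp.1) (v, pl, itp)).1
             (L0.foldl (pvA_pickStepP cp.1) (v, pl, itp)).2.1
             (L0.foldl (pvA_pickStepP cp.1) (v, pl, itp)).2.2 h3

-- ===== VERDICT (by name: the statement is the Claim_ definition above) =====
theorem find_aisles_and_items_spec : Claim_equal_find_aisles_and_items := by
  intro order aisle_book _
  unfold Spec_find_aisles_and_items
  simp only [find_aisles_and_items, find_aisles_and_items_alt]
  set itp0 := PySem.Dict.ofList order with hitp0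
  set ab := PySem.Dict.ofList (aisle_book.map (fun p => (p.1, PySem.Dict.ofList p.2))) with hab
  rw [pv_split itp0 ab.items PySem.Dict.empty PySem.Dict.empty]
  have hvals : ∀ p ∈ ab.items, p.2.keys.Nodup := pv_vals_nodup aisle_book
  have hcit : ∀ c, (ab.items.foldl (pvCitStep itp0) PySem.Dict.empty).getD c []
      = pvRel itp0 ab.items c := by
    intro c
    rw [pv_cit_getD itp0 ab.items PySem.Dict.empty c hvals, PySem.Dict.getD_empty,
      List.nil_append]
  have hfun : (fun (st : PySem.Set Int × PySem.Dict (Int × Int) Int × PySem.Dict Int Int)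
        (cp : Int × Int) => ab.keys.foldl (pvA_pickStep ab cp.1) st)
      = (fun st cp => ab.items.foldl (pvA_pickStepP cp.1) st) := by
    funext st cp
    exact pv_keysfold_eq ab cp.1 st (PySem.Dict.nodup_keys_ofList _)
  rw [hfun]
  obtain ⟨h1, h2⟩ := pv_outer itp0 ab.items
    (ab.items.foldl (pvCitStep itp0) PySem.Dict.empty) hcit
    (PySem.List.sorted (ab.items.foldl (pvA_scoreStep itp0) PySem.Dict.empty).items
      (fun x => x.2) true)
    PySem.Set.empty PySem.Dict.empty itp0 (fun k => rfl)
  rw [h1, h2]
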